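-- pv_equiv track=rewrite | github.com/zelimirmaletic/Parser | Parser.py | formRegexForWizardString
-- ===== SOURCE A (Python) =====
-- specialRegexChars = ['(' , ')' , '.' , '[' , ']' , '*' , '+', '\\' , '/' ]
--
-- def checkSpecialCharacter( character ):
--     for item in specialRegexChars:
--         if(item == character):
--             return True
--     return False
--
-- def formRegexForWizardString(string):
--     regex = ''
--     for char in string:
--         if char == ' ':
--             regex += '\s'
--         elif checkSpecialCharacter(char) == True:
--             regex += '\\'
--             regex += char
--         elif char != '"':
--             regex += char
--     return regex
-- ===== SOURCE B (Python) =====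
-- # B: staged whole-string replace passes (delete quotes, escape backslash, escape the other
-- # specials, then spaces -> \s) instead of A's single per-character branch cascade.
-- def formRegexForWizardString(string):
--     result = string.replace('"', '').replace('\\', '\\\\')
--     for special in '()[].*+/':
--         result = result.replace(special, '\\' + special)
--     return result.replace(' ', '\\s')
-- ===== Notes on version B (the rewrite author's own statement) =====
-- stated objective: faster
-- what changed: Replaced the explicit per-character loop with an if/elif cascade and a linear membership scan by staged whole-string str.replace passes (delete quotes, escape backslash first, then each special character, then spaces to \s).
import Mathlib
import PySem

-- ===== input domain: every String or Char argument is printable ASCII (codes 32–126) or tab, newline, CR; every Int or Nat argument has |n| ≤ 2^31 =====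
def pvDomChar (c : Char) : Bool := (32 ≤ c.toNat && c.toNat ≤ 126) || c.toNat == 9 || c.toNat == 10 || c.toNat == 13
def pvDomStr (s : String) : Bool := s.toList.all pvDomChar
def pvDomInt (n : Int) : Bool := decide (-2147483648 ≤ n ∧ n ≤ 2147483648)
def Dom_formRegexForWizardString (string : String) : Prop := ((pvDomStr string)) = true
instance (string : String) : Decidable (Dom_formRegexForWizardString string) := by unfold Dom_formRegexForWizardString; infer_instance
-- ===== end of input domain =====

-- B replaces A's per-character if/elif cascade (with a linear membership scan) by staged
-- whole-string replace passes (delete quotes, escape backslash, each special, space -> \s);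
-- same return value, more idiomatic.

-- ===== PORT A =====
def specialRegexChars : List Char := ['(', ')', '.', '[', ']', '*', '+', '\\', '/']

def checkSpecialLoop (character : Char) : List Char → Bool
  | [] => false
  | item :: rest => if item == character then true else checkSpecialLoop character rest

def checkSpecialCharacter (character : Char) : Bool :=
  checkSpecialLoop character specialRegexChars

def formRegexForWizardString (string : String) : String :=
  String.ofList (string.toList.foldl (fun regex char =>
    if char == ' ' then regex ++ ['\\', 's']
    else if checkSpecialCharacter char == true then (regex ++ ['\\']) ++ [char]
    else if char != '"' then regex ++ [char]
    else regex) [])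

-- ===== PORT B =====
def formRegexForWizardString_alt (string : String) : String :=
  let result := PySem.Str.replace (PySem.Str.replace string "\"" "") "\\" "\\\\"
  let result := "()[].*+/".toList.foldl
    (fun r special => PySem.Str.replace r (String.ofList [special]) (String.ofList ['\\', special])) result
  PySem.Str.replace result " " "\\s"

-- ===== PRECONDITION & SPEC =====
def Spec_formRegexForWizardString (string : String) (out : String) : Prop := out = formRegexForWizardString_alt string
instance (string : String) (out : String) : Decidable (Spec_formRegexForWizardString string out) := by unfold Spec_formRegexForWizardString; infer_instance

-- ===== CLAIM (what is proved, stated in full; the proofs are below) =====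
def Claim_equal_formRegexForWizardString : Prop := ∀ (string : String), Dom_formRegexForWizardString string → Spec_formRegexForWizardString string (formRegexForWizardString string)

-- ===== LEMMAS AND PROOFS =====

-- per-character substitution: what a single-character str.replace does to each character
def substOne (c : Char) (r : List Char) (l : List Char) : List Char :=
  l.flatMap (fun x => if x = c then r else [x])

theorem substOne_cons (c : Char) (r : List Char) (x : Char) (l : List Char) :
    substOne c r (x :: l) = (if x = c then r else [x]) ++ substOne c r l := by
  simp [substOne]

theorem replace_go_single (c : Char) (r : List Char) :
    ∀ (fuel : Nat) (l acc : List Char), l.length ≤ fuel →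
      PySem.Chars.replace.go [c] r fuel l acc = acc.reverse ++ substOne c r l := by
  intro fuel
  induction fuel with
  | zero =>
    intro l acc h
    have : l = [] := List.eq_nil_of_length_eq_zero (Nat.le_zero.mp h)
    subst this
    simp [PySem.Chars.replace.go, substOne]
  | succ n ih =>
    intro l acc h
    cases l with
    | nil => simp [PySem.Chars.replace.go, substOne]
    | cons x t =>
      by_cases hx : x = c
      · subst hx
        have hpre : List.isPrefixOf [x] (x :: t) = true := by
          simp [List.isPrefixOf]
        rw [PySem.Chars.replace.go]
        simp only [hpre, if_true, List.length_cons, List.drop_succ_cons, List.length_nil, List.drop_zero]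
        rw [ih t (r.reverse ++ acc) (by simpa using Nat.le_of_succ_le_succ h)]
        simp [substOne_cons]
      · have hpre : List.isPrefixOf [c] (x :: t) = false := by
          simp [List.isPrefixOf]
          exact fun hc => absurd hc.symm hx
        rw [PySem.Chars.replace.go]
        simp only [hpre, Bool.false_eq_true, if_false]
        rw [ih t (x :: acc) (by simpa using Nat.le_of_succ_le_succ h)]
        simp [substOne_cons, hx]

-- a single-character str.replace IS the per-character substitution
theorem replace_single (s : List Char) (c : Char) (r : List Char) :
    PySem.Chars.replace s [c] r = substOne c r s := by
  rw [PySem.Chars.replace]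
  simp only [List.isEmpty_cons, Bool.false_eq_true, if_false]
  simpa using replace_go_single c r s.length s [] (le_refl _)

-- B's whole pipeline, at the level of character lists
def pipe (l : List Char) : List Char :=
  substOne ' ' ['\\', 's']
    (substOne '/' ['\\', '/'] (substOne '+' ['\\', '+'] (substOne '*' ['\\', '*']
      (substOne '.' ['\\', '.'] (substOne ']' ['\\', ']'] (substOne '[' ['\\', '[']
        (substOne ')' ['\\', ')'] (substOne '(' ['\\', '(']
          (substOne '\\' ['\\', '\\'] (substOne '"' [] l))))))))))

theorem substOne_append (c : Char) (r : List Char) (a b : List Char) :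
    substOne c r (a ++ b) = substOne c r a ++ substOne c r b := by
  simp [substOne]

theorem pipe_append (a b : List Char) : pipe (a ++ b) = pipe a ++ pipe b := by
  simp [pipe, substOne_append]

-- B's translate rule stated per character (what A's loop body appends)
def translateChar (c : Char) : List Char :=
  if c = ' ' then ['\\', 's']
  else if checkSpecialCharacter c then ['\\', c]
  else if c ≠ '"' then [c]
  else []

theorem pipe_single (x : Char) : pipe [x] = translateChar x := by
  by_cases hsp : x = ' '
  · subst hsp; decide
  by_cases hq : x = '"'
  · subst hq; decide
  by_cases h1 : x = '('
  · subst h1; decide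
  by_cases h2 : x = ')'
  · subst h2; decide
  by_cases h3 : x = '.'
  · subst h3; decide
  by_cases h4 : x = '['
  · subst h4; decide
  by_cases h5 : x = ']'
  · subst h5; decide
  by_cases h6 : x = '*'
  · subst h6; decide
  by_cases h7 : x = '+'
  · subst h7; decide
  by_cases h8 : x = '\\'
  · subst h8; decide
  by_cases h9 : x = '/'
  · subst h9; decide
  simp [pipe, substOne, translateChar, checkSpecialCharacter, checkSpecialLoop, specialRegexChars,
    hsp, hq, h1, h2, h3, h4, h5, h6, h7, h8, h9,
    beq_eq_false_iff_ne.mpr (Ne.symm h1), beq_eq_false_iff_ne.mpr (Ne.symm h2),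
    beq_eq_false_iff_ne.mpr (Ne.symm h3), beq_eq_false_iff_ne.mpr (Ne.symm h4),
    beq_eq_false_iff_ne.mpr (Ne.symm h5), beq_eq_false_iff_ne.mpr (Ne.symm h6),
    beq_eq_false_iff_ne.mpr (Ne.symm h7), beq_eq_false_iff_ne.mpr (Ne.symm h8),
    beq_eq_false_iff_ne.mpr (Ne.symm h9)]

theorem pipe_eq_flatMap (l : List Char) : pipe l = l.flatMap translateChar := by
  induction l with
  | nil => decide
  | cons x t ih =>
    have : x :: t = [x] ++ t := rfl
    rw [this, pipe_append, ih, pipe_single]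
    simp

-- A's loop body appends exactly translateChar of each character
theorem stepA_eq_translateChar (regex : List Char) (c : Char) :
    (if c == ' ' then regex ++ ['\\', 's']
     else if checkSpecialCharacter c == true then (regex ++ ['\\']) ++ [c]
     else if c != '"' then regex ++ [c]
     else regex) = regex ++ translateChar c := by
  unfold translateChar
  by_cases hsp : c = ' '
  · simp [hsp]
  by_cases hs : checkSpecialCharacter c = true
  · simp [hs, beq_eq_false_iff_ne.mpr hsp, hsp]
  by_cases hq : c = '"'
  · simp [hq] at *
    simp [hs]
  · simp [beq_eq_false_iff_ne.mpr hsp, hs, hsp, hq, bne_iff_ne]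

-- B's port unfolds to pipe on the character list
theorem alt_eq_pipe (s : String) :
    formRegexForWizardString_alt s = String.ofList (pipe s.toList) := by
  unfold formRegexForWizardString_alt
  simp only [PySem.Str.replace, String.toList_ofList]
  rw [show "()[].*+/".toList = ['(', ')', '[', ']', '.', '*', '+', '/'] from rfl]
  simp only [List.foldl_cons, List.foldl_nil, String.toList_ofList]
  rw [show ("\"" : String).toList = ['"'] from rfl, show ("" : String).toList = [] from rfl,
      show ("\\" : String).toList = ['\\'] from rfl, show ("\\\\" : String).toList = ['\\', '\\'] from rfl,
      show (" " : String).toList = [' '] from rfl, show ("\\s" : String).toList = ['\\', 's'] from rfl]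
  simp only [replace_single]
  rfl

-- ===== VERDICT (by name: the statement is the Claim_ definition above) =====
theorem formRegexForWizardString_spec : Claim_equal_formRegexForWizardString := by
  intro s _
  unfold Spec_formRegexForWizardString
  rw [alt_eq_pipe, pipe_eq_flatMap]
  unfold formRegexForWizardString
  have h : (fun (regex : List Char) (c : Char) =>
      if c == ' ' then regex ++ ['\\', 's']
      else if checkSpecialCharacter c == true then (regex ++ ['\\']) ++ [c]
      else if c != '"' then regex ++ [c]
      else regex) = fun regex c => regex ++ translateChar c := by
    funext regex c; exact stepA_eq_translateChar regex c
  rw [h, PySem.List.foldl_append_eq_flatMap]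
  simp
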